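-- pv_equiv track=rewrite | github.com/davidvvliet/Intrinsic | backend/app/api/sec.py | expand_metrics
-- ===== SOURCE A (Python) =====
-- STATEMENT_SHORTCUTS = {
--     "income_statement": [
--         "revenue", "cost_of_revenue", "gross_profit", "operating_income",
--         "net_income", "eps", "eps_diluted"
--     ],
--     "balance_sheet": [
--         "total_assets", "current_assets", "total_liabilities", "current_liabilities",
--         "stockholders_equity", "cash", "total_debt", "shares_outstanding"
--     ],
--     "cash_flow_statement": [
--         "operating_cash_flow", "capex", "depreciation", "free_cash_flow"
--     ],
-- }
--
-- def expand_metrics(metrics: list[str]) -> list[str]: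
--     """
--     Expand statement shortcuts into individual metrics.
--     Deduplicates while preserving order.
--     """
--     expanded = []
--     for m in metrics:
--         if m in STATEMENT_SHORTCUTS:
--             expanded.extend(STATEMENT_SHORTCUTS[m])
--         else:
--             expanded.append(m)
--     # Dedupe preserving order
--     return list(dict.fromkeys(expanded))
-- ===== SOURCE B (Python) =====
-- STATEMENT_SHORTCUTS = {
--     "income_statement": [
--         "revenue", "cost_of_revenue", "gross_profit", "operating_income",
--         "net_income", "eps", "eps_diluted"
--     ],
--     "balance_sheet": [
--         "total_assets", "current_assets", "total_liabilities", "current_liabilities",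
--         "stockholders_equity", "cash", "total_debt", "shares_outstanding"
--     ],
--     "cash_flow_statement": [
--         "operating_cash_flow", "capex", "depreciation", "free_cash_flow"
--     ],
-- }
--
-- def _dedup(xs):
--     """First-occurrence dedup by filtering ahead: take the head, then drop
--     all of its copies from the remainder before continuing. No seen-set,
--     no dict: duplicates are removed ahead of the walk, not tracked behind it."""
--     out = []
--     while xs:
--         head = xs[0]
--         out.append(head)
--         xs = [y for y in xs[1:] if y != head]
--     return out
--
-- def expand_metrics(metrics):
--     expanded = [v for m in metrics for v in STATEMENT_SHORTCUTS.get(m, [m])]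
--     return _dedup(expanded)
-- ===== Notes on version B (the rewrite author's own statement) =====
-- stated objective: alternative
-- what changed: Replaces A's build-then-dict.fromkeys with a comprehension flatten followed by a filter-ahead dedup loop (take the head, drop all its copies from the remainder, repeat) - no seen-set and no dict, duplicates are removed in front of the walk instead of tracked behind it.
import Mathlib
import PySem

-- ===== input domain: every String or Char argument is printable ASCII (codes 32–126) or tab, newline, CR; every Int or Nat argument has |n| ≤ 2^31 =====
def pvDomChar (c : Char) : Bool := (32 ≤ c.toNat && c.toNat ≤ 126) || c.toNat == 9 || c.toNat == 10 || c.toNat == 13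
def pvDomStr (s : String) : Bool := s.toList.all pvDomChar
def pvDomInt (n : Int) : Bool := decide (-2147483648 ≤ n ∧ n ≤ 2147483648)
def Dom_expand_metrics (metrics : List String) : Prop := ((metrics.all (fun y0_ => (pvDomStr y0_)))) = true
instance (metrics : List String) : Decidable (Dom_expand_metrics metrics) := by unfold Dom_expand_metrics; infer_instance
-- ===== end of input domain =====

-- B flattens with a comprehension and dedups by a filter-ahead loop (take the head, drop its copies from the remainder) instead of A's build-then-dict.fromkeys; alternative decomposition, no seen structure, quadratic worst case.


-- ===== PORT A =====
def STATEMENT_SHORTCUTS : PySem.Dict String (List String) :=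
  PySem.Dict.ofList
  [("income_statement",
     ["revenue", "cost_of_revenue", "gross_profit", "operating_income",
      "net_income", "eps", "eps_diluted"]),
   ("balance_sheet",
     ["total_assets", "current_assets", "total_liabilities", "current_liabilities",
      "stockholders_equity", "cash", "total_debt", "shares_outstanding"]),
   ("cash_flow_statement",
     ["operating_cash_flow", "capex", "depreciation", "free_cash_flow"])]

-- STATEMENT_SHORTCUTS[m] ported as getD … []: exact, since A only indexes under the 'm in' guard
def expand_metrics (metrics : List String) : List String :=
  let expanded := metrics.foldl
    (fun acc m =>
      if PySem.Dict.contains STATEMENT_SHORTCUTS m then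
        acc ++ PySem.Dict.getD STATEMENT_SHORTCUTS m []
      else
        acc ++ [m]) []
  PySem.List.dedup expanded

-- ===== PORT B =====
-- Source B's _dedup while-loop: state (out, xs); append the head to out, filter its copies from the rest
def pvDedupGo (out : List String) : List String → List String
  | [] => out
  | x :: rest => pvDedupGo (out ++ [x]) (rest.filter (fun y => y ≠ x))
termination_by xs => xs.length
decreasing_by
  simp only [List.length_unattach]
  exact Nat.lt_succ_of_le (le_trans (List.length_filter_le _ _) (le_of_eq List.length_attach))

def expand_metrics_alt (metrics : List String) : List String :=
  pvDedupGo [] (metrics.flatMap (fun m => PySem.Dict.getD STATEMENT_SHORTCUTS m [m]))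

-- ===== PRECONDITION & SPEC =====
def Spec_expand_metrics (metrics : List String) (out : List String) : Prop := out = expand_metrics_alt metrics
instance (metrics : List String) (out : List String) : Decidable (Spec_expand_metrics metrics out) := by unfold Spec_expand_metrics; infer_instance

-- ===== CLAIM (what is proved, stated in full; the proofs are below) =====
def Claim_equal_expand_metrics : Prop := ∀ (metrics : List String), Dom_expand_metrics metrics → Spec_expand_metrics metrics (expand_metrics metrics)

-- ===== LEMMAS AND PROOFS =====

-- recursion-style view of the loop, used only by the proofs
def pvDedup : List String → List String
  | [] => []
  | x :: rest => x :: pvDedup (rest.filter (fun y => y ≠ x))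
termination_by xs => xs.length
decreasing_by
  simp only [List.length_unattach]
  exact Nat.lt_succ_of_le (le_trans (List.length_filter_le _ _) (le_of_eq List.length_attach))

@[simp] lemma pvDedup_nil : pvDedup [] = [] := by rw [pvDedup.eq_def]

lemma pvDedup_cons (x : String) (rest : List String) :
    pvDedup (x :: rest) = x :: pvDedup (rest.filter (fun y => y ≠ x)) := by
  rw [pvDedup.eq_def]

lemma pvDedupGo_eq_aux : ∀ (n : Nat) (xs : List String), xs.length = n →
    ∀ out : List String, pvDedupGo out xs = out ++ pvDedup xs := by
  intro n
  induction n using Nat.strong_induction_on with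
  | _ n ih =>
    intro xs hn out
    match xs with
    | [] => simp [pvDedupGo]
    | x :: rest =>
      rw [pvDedupGo, pvDedup_cons,
        ih (rest.filter (fun y => y ≠ x)).length
          (by subst hn; simpa using Nat.lt_succ_of_le (List.length_filter_le _ _)) _ rfl]
      simp

lemma pvDedupGo_eq (xs : List String) :
    ∀ out : List String, pvDedupGo out xs = out ++ pvDedup xs :=
  pvDedupGo_eq_aux xs.length xs rfl

-- common per-item expansion
def pvExpandOne (m : String) : List String :=
  PySem.Dict.getD STATEMENT_SHORTCUTS m [m]

lemma pvExpandOne_eq (m : String) :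
    (if PySem.Dict.contains STATEMENT_SHORTCUTS m then
        PySem.Dict.getD STATEMENT_SHORTCUTS m []
      else [m]) = pvExpandOne m := by
  unfold pvExpandOne
  rw [PySem.Dict.contains_eq_isSome_get?]
  simp only [PySem.Dict.getD]
  cases PySem.Dict.get? STATEMENT_SHORTCUTS m <;> simp

-- accumulating Set.add fold = acc ++ filter-and-recurse dedup of the not-yet-seen elements
lemma foldl_add_eq_pvDedup (xs : List String) :
    ∀ acc : List String,
      xs.foldl PySem.Set.add acc
        = acc ++ pvDedup (xs.filter (fun y => !(PySem.Set.contains acc y))) := by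
  induction xs with
  | nil => intro acc; simp
  | cons y xs ih =>
    intro acc
    by_cases hy : PySem.Set.contains acc y = true
    · have hadd : PySem.Set.add acc y = acc := by
        unfold PySem.Set.add; rw [hy]; simp
      simp only [List.foldl_cons, List.filter_cons, hy, Bool.not_true, hadd]
      simpa using ih acc
    · have hy' : PySem.Set.contains acc y = false := by
        cases h : PySem.Set.contains acc y
        · rfl
        · exact absurd h hy
      have hadd : PySem.Set.add acc y = acc ++ [y] := by
        unfold PySem.Set.add; rw [hy']; simp
      simp only [List.foldl_cons, List.filter_cons, hy', Bool.not_false, hadd]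
      rw [ih (acc ++ [y])]
      have hfil : xs.filter (fun z => !(PySem.Set.contains (acc ++ [y]) z))
          = (xs.filter (fun z => !(PySem.Set.contains acc z))).filter (fun z => z ≠ y) := by
        rw [List.filter_filter]
        apply List.filter_congr
        intro z _
        by_cases hzy : z = y <;> by_cases hz : z ∈ acc <;>
          simp [PySem.Set.contains, hzy, hz]
      rw [hfil]
      simp only [if_pos trivial, pvDedup_cons]
      simp

lemma expand_metrics_eq_alt (metrics : List String) :
    expand_metrics metrics = expand_metrics_alt metrics := by
  unfold expand_metrics expand_metrics_alt
  have hA : metrics.foldl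
      (fun acc m =>
        if PySem.Dict.contains STATEMENT_SHORTCUTS m then
          acc ++ PySem.Dict.getD STATEMENT_SHORTCUTS m []
        else acc ++ [m]) []
      = metrics.flatMap pvExpandOne := by
    have hstep : ∀ (acc : List String) (m : String),
        (if PySem.Dict.contains STATEMENT_SHORTCUTS m then
            acc ++ PySem.Dict.getD STATEMENT_SHORTCUTS m []
          else acc ++ [m]) = acc ++ pvExpandOne m := by
      intro acc m
      rw [← pvExpandOne_eq m]
      split <;> rfl
    simp only [hstep]
    rw [PySem.List.foldl_append_eq_flatMap]
    rfl
  rw [hA, PySem.List.dedup_eq_ofList, PySem.Set.ofList_eq_foldl,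
    foldl_add_eq_pvDedup]
  have hf : (List.flatMap pvExpandOne metrics).filter
      (fun y => !(PySem.Set.contains ([] : List String) y)) = List.flatMap pvExpandOne metrics := by
    simp [PySem.Set.contains]
  rw [List.nil_append, hf, pvDedupGo_eq, List.nil_append]
  rfl

-- ===== VERDICT (by name: the statement is the Claim_ definition above) =====
theorem expand_metrics_spec : Claim_equal_expand_metrics := by
  intro metrics _
  exact expand_metrics_eq_alt metrics
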